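-- pv_equiv track=rewrite | github.com/IPritisanac/MAGMA_master | subgraph_isomorphism.py | CreateResultDict
-- ===== SOURCE A (Python) =====
-- def CreateResultDict(subisomorphisms_list):
--     #    index in the sublist is index1
--     results = {}
--     for list in subisomorphisms_list:
--         for e in range(len(list)):
--             results.setdefault(e,[]).append(list[e])
--     for key,value in results.items():
--         results[key] = set(value)
--     return results
-- ===== SOURCE B (Python) =====
-- def CreateResultDict(subisomorphisms_list):
--     # Column-major: one dict comprehension over positions, no mutable accumulation.
--     maxlen = max((len(l) for l in subisomorphisms_list), default=0)
--     return {e: {l[e] for l in subisomorphisms_list if e < len(l)}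
--             for e in range(maxlen)}
-- ===== Notes on version B (the rewrite author's own statement) =====
-- stated objective: simpler
-- what changed: A accumulates row-major with setdefault/append and then runs a second pass converting each value list to a set; B computes maxlen once and builds the dict in a single column-major dict comprehension, one set comprehension per position.
import Mathlib
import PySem

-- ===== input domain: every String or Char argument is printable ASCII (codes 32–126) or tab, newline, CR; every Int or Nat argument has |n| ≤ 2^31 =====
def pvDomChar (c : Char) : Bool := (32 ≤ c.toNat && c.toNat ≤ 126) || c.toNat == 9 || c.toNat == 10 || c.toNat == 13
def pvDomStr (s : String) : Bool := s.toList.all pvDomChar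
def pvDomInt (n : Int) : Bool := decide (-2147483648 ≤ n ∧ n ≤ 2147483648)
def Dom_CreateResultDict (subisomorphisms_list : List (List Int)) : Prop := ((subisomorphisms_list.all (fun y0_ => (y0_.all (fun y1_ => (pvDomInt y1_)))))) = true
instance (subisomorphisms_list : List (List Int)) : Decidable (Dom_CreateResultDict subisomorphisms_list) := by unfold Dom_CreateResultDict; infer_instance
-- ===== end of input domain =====

-- B replaces A's row-major setdefault/append accumulation plus second set()-conversion pass
-- by a single column-major dict comprehension over range(maxlen); objective: simpler.

-- ===== PORT A =====
-- A: row-major accumulation dict index → list of values, then a second loop turning each value into a set.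
def CreateResultDict (subisomorphisms_list : List (List Int)) : List (Int × List Int) :=
  let results : PySem.Dict Int (List Int) :=
    subisomorphisms_list.foldl (fun d list =>
      (PySem.List.pyRange 0 (list.length : Int)).foldl
        (fun d e => d.modify e [] (fun v => v ++ [PySem.List.pyGetD list e 0])) d)
      PySem.Dict.empty
  -- for key,value in results.items(): results[key] = set(value)
  let results2 :=
    results.items.foldl (fun d p => d.insert p.1 (PySem.Set.ofList p.2)) results
  results2.items

-- ===== PORT B =====
-- B: maxlen first, then one column-major dict comprehension.
def CreateResultDict_alt (subisomorphisms_list : List (List Int)) : List (Int × List Int) :=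
  let maxlen : Int :=
    PySem.List.maxD (subisomorphisms_list.map (fun l => (l.length : Int))) id 0
  (PySem.List.pyRange 0 maxlen).map (fun e =>
    (e, PySem.Set.ofList (subisomorphisms_list.filterMap (fun l =>
      if e < (l.length : Int) then PySem.List.pyGet? l e else none))))

-- ===== PRECONDITION & SPEC =====
def Spec_CreateResultDict (subisomorphisms_list : List (List Int)) (out : List (Int × List Int)) : Prop := out = CreateResultDict_alt subisomorphisms_list
instance (subisomorphisms_list : List (List Int)) (out : List (Int × List Int)) : Decidable (Spec_CreateResultDict subisomorphisms_list out) := by unfold Spec_CreateResultDict; infer_instance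

-- ===== CLAIM (what is proved, stated in full; the proofs are below) =====
def Claim_equal_CreateResultDict : Prop := ∀ (subisomorphisms_list : List (List Int)), Dom_CreateResultDict subisomorphisms_list → Spec_CreateResultDict subisomorphisms_list (CreateResultDict subisomorphisms_list)

-- ===== LEMMAS AND PROOFS =====

-- enumerate, characterised as a map over range
theorem pvEnumerate_eq (l : List Int) : ∀ s : Int,
    PySem.List.enumerate l s
      = (List.range l.length).map (fun (i : Nat) => (s + (i : Int), l.getD i 0)) := by
  induction l with
  | nil => intro s; simp [PySem.List.enumerate]
  | cons x t ih =>
      intro s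
      simp only [PySem.List.enumerate, List.length_cons, List.range_succ_eq_map,
        List.map_cons, List.map_map, ih (s + 1)]
      congr 1
      · simp
      · apply List.map_congr_left
        intro i _
        simp only [Function.comp_apply, Prod.mk.injEq, List.getD_cons_succ]
        refine ⟨by push_cast; ring, trivial⟩

-- the pair list A's accumulation loop folds over
def pvPairs (xs : List (List Int)) : List (Int × Int) :=
  xs.flatMap (fun l => PySem.List.enumerate l)

-- the natural maximum length
def pvMaxLen (xs : List (List Int)) : Nat :=
  xs.foldl (fun k l => max k l.length) 0

-- A's inner loop over range(len(list)) is the pair fold over enumerate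
theorem pvInnerA (l : List Int) (d : PySem.Dict Int (List Int)) :
    (PySem.List.pyRange 0 (l.length : Int)).foldl
        (fun d e => d.modify e [] (fun v => v ++ [PySem.List.pyGetD l e 0])) d
      = (PySem.List.enumerate l).foldl
        (fun d p => d.modify p.1 [] (fun v => v ++ [p.2])) d := by
  rw [PySem.List.pyRange_zero_natCast, pvEnumerate_eq l 0, List.foldl_map, List.foldl_map]
  apply PySem.List.foldl_congr_mem
  intro d i _
  simp [PySem.List.pyGetD_natCast]

-- A's whole accumulation = one fold over pvPairs
theorem pvBuildA (xs : List (List Int)) :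
    xs.foldl (fun d list =>
      (PySem.List.pyRange 0 (list.length : Int)).foldl
        (fun d e => d.modify e [] (fun v => v ++ [PySem.List.pyGetD list e 0])) d)
      PySem.Dict.empty
    = (pvPairs xs).foldl (fun d p => d.modify p.1 [] (fun v => v ++ [p.2]))
        PySem.Dict.empty := by
  rw [pvPairs, List.foldl_flatMap]
  exact PySem.List.foldl_congr_mem xs _ _ _ (fun d l _ => pvInnerA l d)

-- Set.update of two range prefixes is the range of the max
theorem pvUpd (k : Nat) : ∀ n : Nat,
    PySem.Set.update ((List.range k).map (fun (i : Nat) => (i : Int)))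
        ((List.range n).map (fun (i : Nat) => (i : Int)))
      = (List.range (max k n)).map (fun (i : Nat) => (i : Int)) := by
  intro n
  induction n with
  | zero => simp [PySem.Set.update]
  | succ n ih =>
      have hsplit : PySem.Set.update ((List.range k).map (fun (i : Nat) => (i : Int)))
            ((List.range (n + 1)).map (fun (i : Nat) => (i : Int)))
          = PySem.Set.add
              (PySem.Set.update ((List.range k).map (fun (i : Nat) => (i : Int)))
                ((List.range n).map (fun (i : Nat) => (i : Int)))) ((n : Int)) := by
        rw [List.range_succ, List.map_append, PySem.Set.update, PySem.Set.update,
          List.foldl_append]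
        rfl
      rw [hsplit, ih, PySem.Set.add]
      by_cases h : n < k
      · have hmem : ((n : Int)) ∈ (List.range (max k n)).map (fun (i : Nat) => (i : Int)) := by
          simp only [List.mem_map, List.mem_range]
          exact ⟨n, by omega, rfl⟩
        rw [if_pos (by simpa [List.contains_iff_mem] using hmem)]
        congr 2
        omega
      · have hnmem : ¬ ((n : Int)) ∈ (List.range (max k n)).map (fun (i : Nat) => (i : Int)) := by
          simp only [List.mem_map, List.mem_range]
          rintro ⟨j, hj, hje⟩
          omega
        rw [if_neg (by simpa [List.contains_iff_mem] using hnmem)]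
        rw [show max k n = n by omega, show max k (n + 1) = n + 1 by omega,
          List.range_succ, List.map_append]
        rfl

-- the keys accumulated over all enumerates form range(maxlen)
theorem pvKeysP (xs : List (List Int)) : ∀ k : Nat,
    PySem.Set.update ((List.range k).map (fun (i : Nat) => (i : Int)))
        ((pvPairs xs).map Prod.fst)
      = (List.range (xs.foldl (fun k l => max k l.length) k)).map (fun (i : Nat) => (i : Int)) := by
  induction xs with
  | nil => intro k; simp [pvPairs, PySem.Set.update]
  | cons l t ih =>
      intro k
      have hmap : (PySem.List.enumerate l).map Prod.fst
          = (List.range l.length).map (fun (i : Nat) => (i : Int)) := by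
        rw [pvEnumerate_eq l 0, List.map_map]
        exact List.map_congr_left (fun i _ => by simp)
      simp only [pvPairs, List.flatMap_cons, List.map_append, List.foldl_cons]
      rw [show PySem.Set.update ((List.range k).map (fun (i : Nat) => (i : Int)))
            ((PySem.List.enumerate l).map Prod.fst
              ++ (t.flatMap (fun l => PySem.List.enumerate l)).map Prod.fst)
          = PySem.Set.update
              (PySem.Set.update ((List.range k).map (fun (i : Nat) => (i : Int)))
                ((PySem.List.enumerate l).map Prod.fst))
              ((t.flatMap (fun l => PySem.List.enumerate l)).map Prod.fst) from
        List.foldl_append .., hmap, pvUpd]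
      exact ih (max k l.length)

-- in-place value-rewrite loop: folding insert over the items of a nodup-key dict
theorem pvInsLoop (g : List Int → List Int) : ∀ (post pre : List (Int × List Int)),
    ((pre ++ post).map Prod.fst).Nodup →
    (post.foldl (fun d p => d.insert p.1 (g p.2)) (PySem.Dict.mk (pre ++ post))).items
      = pre ++ post.map (fun p => (p.1, g p.2)) := by
  intro post
  induction post with
  | nil => intro pre _; simp
  | cons p rest ih =>
      intro pre hnd
      have hcont : (PySem.Dict.mk (pre ++ p :: rest)).contains p.1 = true := by
        rw [PySem.Dict.contains_iff_mem_keys]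
        simp [PySem.Dict.keys]
      rw [List.map_append, List.map_cons] at hnd
      have hpre : ∀ q ∈ pre, q.1 ≠ p.1 := by
        intro q hq h
        have h1 : p.1 ∈ List.map Prod.fst pre := List.mem_map.mpr ⟨q, hq, h⟩
        exact (List.nodup_append.mp hnd).2.2 p.1 h1 p.1 (List.mem_cons_self ..) rfl
      have hrest : ∀ q ∈ rest, q.1 ≠ p.1 := by
        intro q hq h
        have h2 := (List.nodup_append.mp hnd).2.1
        simp only [List.nodup_cons] at h2
        exact h2.1 (List.mem_map.mpr ⟨q, hq, h⟩)
      have hitems : ((PySem.Dict.mk (pre ++ p :: rest)).insert p.1 (g p.2)).items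
          = pre ++ (p.1, g p.2) :: rest := by
        rw [PySem.Dict.items_insert_of_contains _ _ hcont]
        show (pre ++ p :: rest).map (fun q => if q.1 == p.1 then (p.1, g p.2) else q)
            = pre ++ (p.1, g p.2) :: rest
        rw [List.map_append, List.map_cons]
        congr 1
        · rw [List.map_congr_left (fun q hq => by
            simp [hpre q hq] : ∀ q ∈ pre, (if q.1 == p.1 then (p.1, g p.2) else q) = q)]
          simp
        · congr 1
          · simp
          · rw [List.map_congr_left (fun q hq => by
              simp [hrest q hq] : ∀ q ∈ rest, (if q.1 == p.1 then (p.1, g p.2) else q) = q)]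
            simp
      have hstep : ((PySem.Dict.mk (pre ++ p :: rest)).insert p.1 (g p.2))
          = PySem.Dict.mk ((pre ++ [(p.1, g p.2)]) ++ rest) := by
        apply PySem.Dict.ext
        rw [hitems]
        simp
      simp only [List.foldl_cons, hstep]
      rw [ih (pre ++ [(p.1, g p.2)]) (by
        rw [List.map_append, List.map_append, List.map_cons]
        simpa using hnd)]
      simp

-- the filter of range by equality with e
theorem pvFilterRange (e : Nat) : ∀ n : Nat,
    (List.range n).filter (fun i => i == e) = if e < n then [e] else [] := by
  intro n
  induction n with
  | zero => simp
  | succ n ih =>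
      rw [List.range_succ, List.filter_append, ih]
      by_cases h : n = e
      · subst h
        simp
      · by_cases h2 : e < n
        · rw [if_pos h2, if_pos (by omega)]
          simp [h]
        · rw [if_neg h2, if_neg (by omega)]
          simp [h]

-- one column, seen from the pair list and seen from B's filterMap
theorem pvCol (e : Nat) : ∀ xs : List (List Int),
    ((pvPairs xs).filter (fun p => p.1 == (e : Int))).map (fun x => x.2)
      = xs.filterMap (fun l =>
          if (e : Int) < (l.length : Int) then PySem.List.pyGet? l (e : Int) else none) := by
  intro xs
  induction xs with
  | nil => simp [pvPairs]
  | cons l t ih =>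
      simp only [pvPairs, List.flatMap_cons, List.filter_append, List.map_append,
        List.filterMap_cons]
      rw [show ((t.flatMap (fun l => PySem.List.enumerate l)).filter
            (fun p => p.1 == (e : Int))).map (fun x => x.2)
          = ((pvPairs t).filter (fun p => p.1 == (e : Int))).map (fun x => x.2) from rfl, ih]
      have hhead : ((PySem.List.enumerate l).filter (fun p => p.1 == (e : Int))).map
            (fun x => x.2)
          = if e < l.length then [l.getD e 0] else [] := by
        rw [pvEnumerate_eq l 0, List.filter_map]
        rw [List.filter_congr (fun i _ => by
          simp [Function.comp] :
          ∀ i ∈ List.range l.length,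
            ((fun p => p.1 == (e : Int)) ∘
              (fun (i : Nat) => ((0 : Int) + (i : Int), l.getD i 0))) i = (i == e))]
        rw [pvFilterRange]
        by_cases h : e < l.length <;> simp [h]
      by_cases h : e < l.length
      · rw [hhead, if_pos h, if_pos (by exact_mod_cast h), PySem.List.pyGet?_natCast,
          List.getElem?_eq_getElem h]
        simp [List.getD_eq_getElem?_getD, List.getElem?_eq_getElem h]
      · rw [hhead, if_neg h, if_neg (by exact_mod_cast h)]
        simp

-- B's maxlen is the cast of the Nat fold of max lengths
def pvStep (acc : Option Int) (x : Int) : Option Int :=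
  match acc with
  | none => some x
  | some m => if m < x then some x else some m

theorem pvMaxFold (ns : List Nat) : ∀ k : Nat,
    List.foldl pvStep (some ((k : Nat) : Int)) (ns.map (fun (n : Nat) => (n : Int)))
      = some ((ns.foldl (fun k n => max k n) k : Nat) : Int) := by
  induction ns with
  | nil => intro k; simp
  | cons n t ih =>
      intro k
      simp only [List.map_cons, List.foldl_cons]
      rw [show pvStep (some ((k : Nat) : Int)) ((n : Nat) : Int)
            = some ((max k n : Nat) : Int) by
          simp only [pvStep]
          split_ifs with h <;> congr 1 <;> push_cast <;> omega]
      exact ih (max k n)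

theorem pvMaxLenB (xs : List (List Int)) :
    PySem.List.maxD (xs.map (fun l => (l.length : Int))) id 0
      = ((pvMaxLen xs : Nat) : Int) := by
  have hconv : ∀ ys : List Int, PySem.List.max? ys id = ys.foldl pvStep none := by
    intro ys
    unfold PySem.List.max?
    apply PySem.List.foldl_congr_mem
    intro acc x _
    cases acc <;> rfl
  cases xs with
  | nil => simp [PySem.List.maxD, PySem.List.max?, pvMaxLen]
  | cons l t =>
      simp only [PySem.List.maxD, hconv, List.map_cons, List.foldl_cons, pvMaxLen]
      rw [show pvStep none ((l.length : Nat) : Int) = some ((l.length : Nat) : Int) from rfl]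
      rw [show (t.map (fun l => (l.length : Int)))
          = ((t.map (fun l => l.length)).map (fun (n : Nat) => (n : Int))) by
        rw [List.map_map]
        rfl]
      rw [pvMaxFold (t.map (fun l => l.length)) l.length, List.foldl_map]
      simp

-- ===== VERDICT (by name: the statement is the Claim_ definition above) =====
theorem CreateResultDict_spec : Claim_equal_CreateResultDict := by
  intro xs _
  show CreateResultDict xs = CreateResultDict_alt xs
  simp only [CreateResultDict, CreateResultDict_alt]
  rw [pvBuildA]
  set R := (pvPairs xs).foldl (fun d p => d.modify p.1 [] (fun v => v ++ [p.2]))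
    PySem.Dict.empty with hR
  have hnd : R.keys.Nodup := by
    rw [hR]
    exact PySem.Dict.nodup_keys_foldl_modify_key (pvPairs xs) Prod.fst []
      (fun _ p => (fun v => v ++ [p.2])) PySem.Dict.empty PySem.Dict.nodup_keys_empty
  have hkeys : R.keys = (List.range (pvMaxLen xs)).map (fun (i : Nat) => (i : Int)) := by
    rw [hR, PySem.Dict.keys_foldl_modify_key, PySem.Dict.keys_empty]
    have h0 := pvKeysP xs 0
    simpa [pvMaxLen] using h0
  have hitems : R.items
      = (List.range (pvMaxLen xs)).map (fun (e : Nat) => ((e : Int), R.getD (e : Int) [])) := by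
    rw [PySem.Dict.items_eq_map_keys R hnd [], hkeys, List.map_map]
    rfl
  have hloop : (R.items.foldl (fun d p => d.insert p.1 (PySem.Set.ofList p.2)) R).items
      = R.items.map (fun p => (p.1, PySem.Set.ofList p.2)) := by
    have h := pvInsLoop PySem.Set.ofList R.items [] (by simpa [PySem.Dict.keys] using hnd)
    simpa using h
  rw [hloop, hitems, List.map_map, pvMaxLenB, PySem.List.pyRange_zero_natCast, List.map_map]
  apply List.map_congr_left
  intro e _
  simp only [Function.comp_apply, Prod.mk.injEq, true_and]
  rw [← pvCol e xs, hR, PySem.Dict.getD_foldl_modify_append, PySem.Dict.getD_empty,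
    List.nil_append]
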